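-- pv_equiv track=rewrite | github.com/Daniel-Syddall/game_beanWorld | Code/0.5 - idk/Game/Main/Grid/Runtime/OffsetArrayDisplacement.py | Grid_OffsetArrayDisplacement
-- ===== SOURCE A (Python) =====
-- def Grid_OffsetArrayDisplacement(Displacement):
--
--     ArrayDisplacementStart = -8
--
--     for _ in range(Displacement):
--         ArrayDisplacementStart -= 1
--         if ArrayDisplacementStart == -17: ArrayDisplacementStart = -1
--
--     DisplacementArray = []
--     for _ in range(16):
--         ArrayDisplacementStart -= 1
--         if ArrayDisplacementStart == -17: ArrayDisplacementStart = -1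
--         DisplacementArray.append(ArrayDisplacementStart)
--
--     return DisplacementArray
-- ===== SOURCE B (Python) =====
-- def Grid_OffsetArrayDisplacement(Displacement):
--     base = (8 + max(Displacement, 0)) % 16
--     return [-(((base + i) % 16) + 1) for i in range(16)]
-- ===== Notes on version B (the rewrite author's own statement) =====
-- stated objective: faster
-- what changed: Replaced the O(Displacement) simulation loop that decrements a cursor once per displacement step with a closed-form modulo computation of the starting offset, generating the fixed-length output directly.
import Mathlib
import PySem

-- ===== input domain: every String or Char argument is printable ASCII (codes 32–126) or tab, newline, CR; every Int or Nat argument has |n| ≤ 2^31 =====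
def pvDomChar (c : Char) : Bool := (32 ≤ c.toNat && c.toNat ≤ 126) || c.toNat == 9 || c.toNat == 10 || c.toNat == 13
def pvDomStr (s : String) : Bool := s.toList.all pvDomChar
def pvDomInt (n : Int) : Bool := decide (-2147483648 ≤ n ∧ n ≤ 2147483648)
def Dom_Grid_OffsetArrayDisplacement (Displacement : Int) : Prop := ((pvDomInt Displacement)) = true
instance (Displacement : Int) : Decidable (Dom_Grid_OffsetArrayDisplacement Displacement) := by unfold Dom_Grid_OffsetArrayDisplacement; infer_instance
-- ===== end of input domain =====

-- B replaces A's O(Displacement) decrement-simulation loop with an O(1) closed-form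
-- modulo computation of the starting offset; the return values are identical.

-- ===== PORT A =====
-- one step of A's cursor update: decrement, wrap -17 back to -1
def pvAStep (v : Int) (_ : Int) : Int :=
  let v' := v - 1
  if v' = -17 then -1 else v'

def Grid_OffsetArrayDisplacement (Displacement : Int) : List Int :=
  -- for _ in range(Displacement): …
  let s := (PySem.List.pyRange 0 Displacement 1).foldl pvAStep (-8)
  -- for _ in range(16): …; DisplacementArray.append(…)
  ((PySem.List.pyRange 0 16 1).foldl
    (fun (st : Int × List Int) _ =>
      let v := pvAStep st.1 0
      (v, st.2 ++ [v])) (s, [])).2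

-- ===== PORT B =====
def Grid_OffsetArrayDisplacement_alt (Displacement : Int) : List Int :=
  let base := PySem.Int.mod (8 + max Displacement 0) 16
  (PySem.List.pyRange 0 16 1).map (fun i => -(PySem.Int.mod (base + i) 16 + 1))

-- ===== PRECONDITION & SPEC =====
def Spec_Grid_OffsetArrayDisplacement (Displacement : Int) (out : List Int) : Prop := out = Grid_OffsetArrayDisplacement_alt Displacement
instance (Displacement : Int) (out : List Int) : Decidable (Spec_Grid_OffsetArrayDisplacement Displacement out) := by unfold Spec_Grid_OffsetArrayDisplacement; infer_instance

-- ===== CLAIM (what is proved, stated in full; the proofs are below) =====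
def Claim_equal_Grid_OffsetArrayDisplacement : Prop := ∀ (Displacement : Int), Dom_Grid_OffsetArrayDisplacement Displacement → Spec_Grid_OffsetArrayDisplacement Displacement (Grid_OffsetArrayDisplacement Displacement)

-- ===== LEMMAS AND PROOFS =====

-- A's step ignores the loop variable, so the first fold is an iterate of length-many steps.
lemma pvFoldl_aStep (l : List Int) (s : Int) :
    l.foldl pvAStep s = (fun v => pvAStep v 0)^[l.length] s := by
  induction l generalizing s with
  | nil => rfl
  | cons x xs ih =>
    have hx : pvAStep s x = pvAStep s 0 := rfl
    simp [List.foldl, ih, Function.iterate_succ_apply, hx]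

-- closed form of n iterations of A's step, starting inside the cycle
lemma pvIter_aStep (n : Nat) (t : Int) (h0 : 0 ≤ t) (h1 : t < 16) :
    (fun v => pvAStep v 0)^[n] (-(t + 1)) = -((t + n) % 16 + 1) := by
  induction n generalizing t with
  | zero => simp; omega
  | succ n ih =>
    rw [Function.iterate_succ_apply]
    have hstep : pvAStep (-(t + 1)) 0 = -(((t + 1) % 16) + 1) := by
      simp only [pvAStep]
      split_ifs with h <;> omega
    rw [hstep, ih ((t + 1) % 16) (by omega) (by omega)]
    congr 1
    omega

-- the 16-element output loop, starting at cursor -(t+1) with 0 ≤ t < 16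
lemma pvLoop2 (t : Int) (h0 : 0 ≤ t) (h1 : t < 16) :
    ((PySem.List.pyRange 0 16 1).foldl
      (fun (st : Int × List Int) _ =>
        let v := pvAStep st.1 0
        (v, st.2 ++ [v])) (-(t + 1), [])).2 =
    (PySem.List.pyRange 0 16 1).map (fun i => -((t + 1 + i) % 16 + 1)) := by
  interval_cases t <;> decide

theorem Grid_OffsetArrayDisplacement_spec : Claim_equal_Grid_OffsetArrayDisplacement := by
  intro D _
  unfold Spec_Grid_OffsetArrayDisplacement Grid_OffsetArrayDisplacement Grid_OffsetArrayDisplacement_alt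
  have hlen : (PySem.List.pyRange 0 D 1).length = (D - 0).toNat := PySem.List.length_pyRange_one 0 D
  have hs : (PySem.List.pyRange 0 D 1).foldl pvAStep (-8) = -((7 + max D 0) % 16 + 1) := by
    rw [pvFoldl_aStep, hlen]
    have h8 : (-8 : Int) = -((7 : Int) + 1) := by norm_num
    rw [h8, pvIter_aStep ((D - 0).toNat) 7 (by norm_num) (by norm_num)]
    congr 1
    omega
  rw [hs]
  set t : Int := (7 + max D 0) % 16 with ht
  have h0 : 0 ≤ t := Int.emod_nonneg _ (by norm_num)
  have h1 : t < 16 := Int.emod_lt_of_pos _ (by norm_num)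
  rw [pvLoop2 t h0 h1]
  apply List.map_congr_left
  intro i _
  have hmod : PySem.Int.mod (PySem.Int.mod (8 + max D 0) 16 + i) 16 = (t + 1 + i) % 16 := by
    rw [PySem.Int.mod_eq_emod_of_pos (by norm_num), PySem.Int.mod_eq_emod_of_pos (by norm_num), ht]
    omega
  rw [hmod]
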